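-- pv_equiv track=rewrite | github.com/arkalia-luna-system/ia-pipeline | archive/archivage_20250720_151643/integration_automatique.py | select_main_class
-- ===== SOURCE A (Python) =====
-- from typing import List, Dict, Any
--
-- def select_main_class(classes: List[str], module_name: str) -> str:
--     """Sélectionner la classe principale d'un module"""
--     # Priorité aux classes avec le nom du module
--     for class_name in classes:
--         if class_name.lower().replace('_', '') == module_name.lower().replace('_', ''):
--             return class_name
--
--     # Priorité aux classes avec des mots-clés spécifiques
--     priority_keywords = ['Manager', 'Analyzer', 'Auditor', 'Controller', 'Handler']
--     for keyword in priority_keywords: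
--         for class_name in classes:
--             if keyword in class_name:
--                 return class_name
--
--     # Sinon, prendre la première classe
--     return classes[0]
-- ===== SOURCE B (Python) =====
-- def select_main_class(classes, module_name):
--     """Selectionner la classe principale d'un module"""
--     target = module_name.lower().replace('_', '')
--     for class_name in classes:
--         if class_name.lower().replace('_', '') == target:
--             return class_name
--     keywords = ['Manager', 'Analyzer', 'Auditor', 'Controller', 'Handler']
--     # single pass: keep the class with the smallest keyword-priority index,
--     # ties broken by earliest position; no keyword hit leaves classes[0]
--     best_k = len(keywords)
--     best_name = classes[0]
--     for class_name in classes: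
--         k = next((i for i, kw in enumerate(keywords) if kw in class_name), len(keywords))
--         if k < best_k:
--             best_k = k
--             best_name = class_name
--     return best_name
-- ===== Notes on version B (the rewrite author's own statement) =====
-- stated objective: alternative
-- what changed: Replaces the keyword-outer/class-inner nested scan with a single pass over the classes that tracks the argmin of each class's first-matching-keyword index (ties to the earliest class, no keyword hit defaulting to classes[0]).
import Mathlib
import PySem

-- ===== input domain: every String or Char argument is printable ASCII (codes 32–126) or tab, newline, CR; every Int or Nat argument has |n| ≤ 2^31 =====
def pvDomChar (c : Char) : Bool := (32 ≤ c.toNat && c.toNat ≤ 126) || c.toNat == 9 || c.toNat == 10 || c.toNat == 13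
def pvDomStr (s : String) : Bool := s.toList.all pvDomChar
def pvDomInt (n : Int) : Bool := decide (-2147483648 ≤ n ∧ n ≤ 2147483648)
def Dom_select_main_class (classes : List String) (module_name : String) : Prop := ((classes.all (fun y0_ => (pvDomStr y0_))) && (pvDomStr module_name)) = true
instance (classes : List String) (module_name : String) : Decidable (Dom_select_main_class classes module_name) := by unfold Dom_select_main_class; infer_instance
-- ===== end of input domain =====

-- ===== PORT A =====
-- B changes only the keyword phase to a one-pass argmin; equivalence is on the return value (Pre_ excludes the empty list, where A raises IndexError).
def pyNorm (s : String) : String := PySem.Str.replace (PySem.Str.lower s) "_" ""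

-- A's second phase: for each keyword in order, return the first class containing it
def aKwLoop (classes : List String) : List String → Option String
  | [] => none
  | kw :: rest =>
    match classes.find? (fun c => PySem.Str.isIn kw c) with
    | some c => some c
    | none => aKwLoop classes rest

def select_main_class (classes : List String) (module_name : String) : String :=
  match classes.find? (fun c => pyNorm c == pyNorm module_name) with
  | some c => c
  | none =>
    match aKwLoop classes ["Manager", "Analyzer", "Auditor", "Controller", "Handler"] with
    | some c => c
    | none => (PySem.List.pyGet? classes 0).getD ""

-- ===== PORT B =====
-- index of the first keyword contained in c, else the length of the keyword list
def kIdx : List String → String → Nat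
  | [], _ => 0
  | kw :: rest, c => if PySem.Str.isIn kw c then 0 else kIdx rest c + 1

def bStep (kws : List String) (b : Nat × String) (c : String) : Nat × String :=
  if kIdx kws c < b.1 then (kIdx kws c, c) else b

def select_main_class_alt (classes : List String) (module_name : String) : String :=
  let target := pyNorm module_name
  match classes.find? (fun c => pyNorm c == target) with
  | some c => c
  | none =>
    let kws := ["Manager", "Analyzer", "Auditor", "Controller", "Handler"]
    (classes.foldl (bStep kws) (kws.length, (PySem.List.pyGet? classes 0).getD "")).2

-- ===== PRECONDITION & SPEC =====
-- Pre_ excludes the empty class list, on which the Python A raises IndexError (classes[0]); B raises there too.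
def Pre_select_main_class (classes : List String) (_module_name : String) : Prop := classes ≠ []
instance (classes : List String) (module_name : String) : Decidable (Pre_select_main_class classes module_name) := by unfold Pre_select_main_class; infer_instance
def pvWitness_select_main_class : List String × String := (["FooHandler", "BarManager"], "baz")
def Spec_select_main_class (classes : List String) (module_name : String) (out : String) : Prop := out = select_main_class_alt classes module_name
instance (classes : List String) (module_name : String) (out : String) : Decidable (Spec_select_main_class classes module_name out) := by unfold Spec_select_main_class; infer_instance

-- ===== CLAIM (what is proved, stated in full; the proofs are below) =====
def Claim_equal_select_main_class : Prop := ∀ (classes : List String) (module_name : String), Dom_select_main_class classes module_name → Pre_select_main_class classes module_name → Spec_select_main_class classes module_name (select_main_class classes module_name)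

-- ===== LEMMAS AND PROOFS =====
-- once the running minimum is 0 the fold never changes state
theorem foldl_bStep_zero (kws : List String) (classes : List String) (b : Nat × String)
    (hb : b.1 = 0) : classes.foldl (bStep kws) b = b := by
  induction classes generalizing b with
  | nil => rfl
  | cons c cs ih =>
    simp only [List.foldl_cons, bStep, hb]
    rw [if_neg (Nat.not_lt_zero _)]
    exact ih b hb

-- if some class has kIdx 0, the fold returns the first such class
theorem foldl_bStep_first_zero (kws : List String) (classes : List String) (c : String)
    (b : Nat × String) (hb : 0 < b.1)
    (h : classes.find? (fun x => kIdx kws x == 0) = some c) :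
    (classes.foldl (bStep kws) b).2 = c := by
  induction classes generalizing b with
  | nil => simp at h
  | cons x xs ih =>
    cases hx : (kIdx kws x == 0) with
    | true =>
      have hx0 : kIdx kws x = 0 := by simpa using hx
      have hc : c = x := by
        rw [List.find?_cons_of_pos (p := fun y => kIdx kws y == 0) hx] at h
        exact (Option.some.inj h).symm
      subst hc
      simp only [List.foldl_cons, bStep, hx0]
      rw [if_pos hb, foldl_bStep_zero kws xs (0, c) rfl]
    | false =>
      have hx0 : kIdx kws x ≠ 0 := by simpa using hx
      have h' : xs.find? (fun y => kIdx kws y == 0) = some c := by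
        rw [List.find?_cons_of_neg (p := fun y => kIdx kws y == 0) (by simp [hx])] at h
        exact h
      simp only [List.foldl_cons, bStep]
      split
      · exact ih (kIdx kws x, x) (Nat.pos_of_ne_zero hx0) h'
      · exact ih b hb h'

-- shifting every key by one shifts the fold state by one
theorem foldl_shift (f g : String → Nat) (classes : List String) (b : Nat × String)
    (hfg : ∀ c ∈ classes, f c = g c + 1) :
    classes.foldl (fun b c => if f c < b.1 then (f c, c) else b) (b.1 + 1, b.2)
      = ((classes.foldl (fun b c => if g c < b.1 then (g c, c) else b) b).1 + 1,
         (classes.foldl (fun b c => if g c < b.1 then (g c, c) else b) b).2) := by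
  induction classes generalizing b with
  | nil => rfl
  | cons x xs ih =>
    have hx : f x = g x + 1 := hfg x (by simp)
    have hrest : ∀ c ∈ xs, f c = g c + 1 := fun c hc => hfg c (by simp [hc])
    simp only [List.foldl_cons, hx]
    by_cases hlt : g x < b.1
    · rw [if_pos (by omega), if_pos hlt]
      exact ih (g x, x) hrest
    · rw [if_neg (by omega), if_neg hlt]
      exact ih b hrest

-- main lemma: A's nested keyword loop (with default x) equals B's one-pass argmin
theorem aKwLoop_eq_fold (kws : List String) (classes : List String) (x : String) :
    (match aKwLoop classes kws with
     | some c => c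
     | none => x)
      = (classes.foldl (bStep kws) (kws.length, x)).2 := by
  induction kws generalizing x with
  | nil =>
    show x = (classes.foldl (bStep []) (0, x)).2
    rw [foldl_bStep_zero [] classes (0, x) rfl]
  | cons kw rest ih =>
    cases hf : classes.find? (fun c => PySem.Str.isIn kw c) with
    | some c =>
      have hpe : (fun y => kIdx (kw :: rest) y == 0) = (fun c => PySem.Str.isIn kw c) := by
        funext y
        show ((if PySem.Str.isIn kw y then 0 else kIdx rest y + 1) == 0) = PySem.Str.isIn kw y
        cases hy : PySem.Str.isIn kw y
        · rw [if_neg (by simp [hy])]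
          simp
        · rw [if_pos (by simp [hy])]
          rfl
      have hf0 : classes.find? (fun y => kIdx (kw :: rest) y == 0) = some c := by
        rw [hpe]; exact hf
      have := foldl_bStep_first_zero (kw :: rest) classes c (rest.length + 1, x)
        (by omega) hf0
      simp only [aKwLoop, hf]
      simpa [List.length_cons] using this.symm
    | none =>
      have hnone : ∀ c ∈ classes, ¬ PySem.Str.isIn kw c = true := by
        intro c hc
        exact List.find?_eq_none.mp hf c hc
      have hcongr : classes.foldl (bStep (kw :: rest)) (rest.length + 1, x)
          = classes.foldl (fun b c => if kIdx rest c + 1 < b.1 then (kIdx rest c + 1, c) else b)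
              (rest.length + 1, x) := by
        apply PySem.List.foldl_congr_mem
        intro b c hc
        show (if kIdx (kw :: rest) c < b.1 then (kIdx (kw :: rest) c, c) else b) = _
        rw [show kIdx (kw :: rest) c = kIdx rest c + 1 by
          show (if PySem.Str.isIn kw c then 0 else kIdx rest c + 1) = kIdx rest c + 1
          rw [if_neg (hnone c hc)]]
      have hshift := foldl_shift (fun c => kIdx rest c + 1) (fun c => kIdx rest c)
        classes (rest.length, x) (fun c _ => rfl)
      simp only [aKwLoop, hf, List.length_cons]
      rw [hcongr]
      rw [show rest.length + 1 = (rest.length, x).1 + 1 from rfl]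
      rw [show ((rest.length, x) : Nat × String).2 = x from rfl] at hshift
      rw [hshift]
      show (match aKwLoop classes rest with
            | some c => c
            | none => x)
          = (classes.foldl (bStep rest) (rest.length, x)).2
      exact ih x

-- ===== VERDICT (by name: the statement is the Claim_ definition above) =====
theorem select_main_class_spec : Claim_equal_select_main_class := by
  intro classes module_name _ _
  unfold Spec_select_main_class select_main_class select_main_class_alt
  cases hf : classes.find? (fun c => pyNorm c == pyNorm module_name) with
  | some c => simp [hf]
  | none =>
    simp only [hf]
    exact aKwLoop_eq_fold ["Manager", "Analyzer", "Auditor", "Controller", "Handler"]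
      classes ((PySem.List.pyGet? classes 0).getD "")
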